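-- pv_equiv track=rewrite | github.com/rio-project/rio | rio_docs/parsers.py | parse_descriptions
-- ===== SOURCE A (Python) =====
-- def parse_descriptions(description: str) -> tuple[str | None, str | None]:
--     """
--     Given the description part of a docstring, split it into short and long
--     descriptions. Either value may be Nonne if they are not present in the
--     original string.
--     """
--     description = description.strip()
--
--     # Split into short & long descriptions
--     lines = description.split("\n")
--
--     short_lines: list[str] = []
--     long_lines: list[str] = []
--     cur_lines = short_lines
--
--     for raw_line in lines:
--         strip_line = raw_line.strip()
--
--         cur_lines.append(raw_line)
--
--         if not strip_line:
--             cur_lines = long_lines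
--
--     # Join the lines
--     short_description = "\n".join(short_lines).strip()
--     long_description = "\n".join(long_lines).strip()
--
--     if not short_description:
--         short_description = None
--
--     if not long_description:
--         long_description = None
--
--     # Done
--     return short_description, long_description
-- ===== SOURCE B (Python) =====
-- def parse_descriptions(description: str) -> tuple[str | None, str | None]:
--     head, tail = _cut(description.strip())
--     return (head.strip() or None, tail.strip() or None)
--
--
-- def _cut(text: str) -> tuple[str, str]:
--     """Recursively peel the first line off `text`; cut at the first blank line,
--     which is dropped (its whitespace vanishes in the final strip anyway)."""
--     parts = text.split("\n", 1)
--     if len(parts) == 1: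
--         return text, ""
--     first, rest = parts
--     if not first.strip():
--         return "", rest
--     head, tail = _cut(rest)
--     return first + "\n" + head, tail
-- ===== Notes on version B (the rewrite author's own statement) =====
-- stated objective: alternative
-- what changed: A splits the text into a list of all lines and runs a moving-pointer accumulator loop over it; B never builds a line list: a recursive worker repeatedly splits off just the first line (str.split with maxsplit 1), cuts at the first blank line, and concatenates the head back up the recursion.
import Mathlib
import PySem

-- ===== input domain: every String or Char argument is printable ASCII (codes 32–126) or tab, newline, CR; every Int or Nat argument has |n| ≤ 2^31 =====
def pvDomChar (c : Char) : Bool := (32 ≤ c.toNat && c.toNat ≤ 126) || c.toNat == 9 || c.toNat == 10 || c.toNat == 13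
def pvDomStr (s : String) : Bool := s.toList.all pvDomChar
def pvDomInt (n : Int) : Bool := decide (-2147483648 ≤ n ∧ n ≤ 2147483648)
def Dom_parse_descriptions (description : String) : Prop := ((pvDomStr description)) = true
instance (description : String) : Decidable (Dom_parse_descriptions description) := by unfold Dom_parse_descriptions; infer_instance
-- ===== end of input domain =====

-- B replaces A's split-into-a-line-list + moving-pointer accumulator loop by a recursive worker
-- that repeatedly splits off only the first line with split("\n", 1) (objective: alternative).

-- ===== PORT A =====
-- loop state: (short_lines, long_lines, cur-is-short flag); 'cur_lines.append' is the flag-guarded append,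
-- 'if not strip_line: cur_lines = long_lines' is setting the flag to false.
def pvStepA (st : List String × List String × Bool) (raw_line : String) : List String × List String × Bool :=
  let strip_line := PySem.Str.strip raw_line
  let st' := if st.2.2 then (st.1 ++ [raw_line], st.2.1, st.2.2) else (st.1, st.2.1 ++ [raw_line], st.2.2)
  if strip_line == "" then (st'.1, st'.2.1, false) else st'

def parse_descriptions (description : String) : Option String × Option String :=
  let description := PySem.Str.strip description
  let lines := (PySem.Str.split? description "\n").getD []  -- sep = "\n" ≠ "", so split? is always some
  let st := lines.foldl pvStepA ([], [], true)
  let short_description := PySem.Str.strip (PySem.Str.join "\n" st.1)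
  let long_description := PySem.Str.strip (PySem.Str.join "\n" st.2.1)
  (if short_description == "" then none else some short_description,
   if long_description == "" then none else some long_description)

-- ===== PORT B =====
-- Source B's _cut recursion works on str; it is ported on the char list (PySem.Str.* are thin exact
-- wrappers over PySem.Chars.* on toList, so this is the same computation).
-- The next four lemmas exist only so pvCut's recursion can be shown terminating (cited in its
-- decreasing_by): pvSplit1 characterises what text.split("\n", 1) returns.
def pvSplit1 : List Char → List (List Char)
  | [] => [[]]
  | c :: rest => if c = '\n' then [[], rest] else (pvSplit1 rest).modifyHead (c :: ·)

lemma pvSplit1_ne_nil (cs : List Char) : pvSplit1 cs ≠ [] := by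
  induction cs with
  | nil => simp [pvSplit1]
  | cons c rest ih =>
      simp only [pvSplit1]
      split_ifs
      · simp
      · cases h : pvSplit1 rest with
        | nil => exact absurd h ih
        | cons p ps => simp

lemma pvGo1_zero (fuel : Nat) (l cur : List Char) (acc : List (List Char)) :
    PySem.Chars.splitOnMax.go ['\n'] fuel 0 l cur acc = ((cur.reverse ++ l) :: acc).reverse := by
  cases fuel <;> cases l <;> simp [PySem.Chars.splitOnMax.go]

lemma pvGo1_spec (fuel : Nat) (l cur : List Char) (acc : List (List Char)) (h : l.length < fuel) :
    PySem.Chars.splitOnMax.go ['\n'] fuel 1 l cur acc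
      = acc.reverse ++ (pvSplit1 l).modifyHead (cur.reverse ++ ·) := by
  induction fuel generalizing l cur acc with
  | zero => omega
  | succ fuel ih =>
    cases l with
    | nil => simp [PySem.Chars.splitOnMax.go, pvSplit1]
    | cons c rest =>
      by_cases hc : c = '\n'
      · subst hc
        rw [show PySem.Chars.splitOnMax.go ['\n'] (fuel+1) 1 ('\n' :: rest) cur acc
              = PySem.Chars.splitOnMax.go ['\n'] fuel 0 (List.drop 1 ('\n' :: rest)) [] (cur.reverse :: acc) by
            simp [PySem.Chars.splitOnMax.go, List.isPrefixOf]]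
        rw [pvGo1_zero]
        simp [pvSplit1]
      · rw [show PySem.Chars.splitOnMax.go ['\n'] (fuel+1) 1 (c :: rest) cur acc
              = PySem.Chars.splitOnMax.go ['\n'] fuel 1 rest (c :: cur) acc by
            rw [PySem.Chars.splitOnMax.go.eq_def]
            have hpf : (['\n'].isPrefixOf (c :: rest)) = false := by
              simp only [List.isPrefixOf, Bool.and_eq_false_iff]
              left
              rw [beq_eq_false_iff_ne]
              exact fun hh => hc hh.symm
            simp only [hpf, Bool.false_eq_true, if_false]
            simp]
        rw [ih _ _ _ (by simpa using h)]
        simp only [pvSplit1, if_neg hc, List.modifyHead_modifyHead]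
        cases hp : pvSplit1 rest with
        | nil => exact absurd hp (pvSplit1_ne_nil rest)
        | cons p ps => simp

lemma pvSplitOnMax_one (cs : List Char) :
    PySem.Chars.splitOnMax cs ['\n'] 1 = pvSplit1 cs := by
  rw [PySem.Chars.splitOnMax]
  rw [if_neg (by norm_num)]
  rw [show ((1:Int).toNat) = 1 from rfl]
  rw [pvGo1_spec _ _ _ _ (by omega)]
  cases h : pvSplit1 cs with
  | nil => exact absurd h (pvSplit1_ne_nil cs)
  | cons p ps => simp

lemma pvSplit1_pair {cs a r : List Char} (h : pvSplit1 cs = [a, r]) : cs = a ++ '\n' :: r := by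
  induction cs generalizing a with
  | nil => simp [pvSplit1] at h
  | cons c rest ih =>
      by_cases hc : c = '\n'
      · subst hc
        simp only [pvSplit1, if_pos rfl] at h
        obtain ⟨rfl, rfl⟩ := by simpa using h
        simp
      · simp only [pvSplit1, if_neg hc] at h
        cases hp : pvSplit1 rest with
        | nil => exact absurd hp (pvSplit1_ne_nil rest)
        | cons p ps =>
            rw [hp] at h
            simp only [List.modifyHead_cons] at h
            obtain ⟨rfl, hps⟩ := by simpa using h
            cases ps with
            | nil => simp at hps
            | cons q qs =>
                obtain ⟨rfl, rfl⟩ := by simpa using hps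
                have hrest := ih (a := p) (by simpa [hp])
                subst hrest
                simp

def pvCut (text : List Char) : List Char × List Char :=
  match h : PySem.Chars.splitOnMax text ['\n'] 1 with  -- text.split("\n", 1)
  | [_] => (text, [])
  | [first, rest] =>
      if PySem.Chars.strip first = [] then ([], rest)
      else
        let p := pvCut rest
        (first ++ '\n' :: p.1, p.2)
  | _ => (text, [])  -- unreachable: split("\n", 1) yields one or two parts
termination_by text.length
decreasing_by
  have h1 : pvSplit1 text = [first, rest] := by rw [← pvSplitOnMax_one]; exact h
  have h2 := pvSplit1_pair h1
  subst h2
  simp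
  omega

def parse_descriptions_alt (description : String) : Option String × Option String :=
  let p := pvCut (PySem.Str.strip description).toList
  let short := PySem.Chars.strip p.1
  let long := PySem.Chars.strip p.2
  (if short = [] then none else some (String.ofList short),
   if long = [] then none else some (String.ofList long))

-- ===== PRECONDITION & SPEC =====
def Spec_parse_descriptions (description : String) (out : Option String × Option String) : Prop := out = parse_descriptions_alt description
instance (description : String) (out : Option String × Option String) : Decidable (Spec_parse_descriptions description out) := by unfold Spec_parse_descriptions; infer_instance

-- ===== CLAIM (what is proved, stated in full; the proofs are below) =====
def Claim_equal_parse_descriptions : Prop := ∀ (description : String), Dom_parse_descriptions description → Spec_parse_descriptions description (parse_descriptions description)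

-- ===== LEMMAS AND PROOFS =====

-- characterisation of A's full split("\n")
def pvSplitNl : List Char → List (List Char)
  | [] => [[]]
  | c :: rest => if c = '\n' then [] :: pvSplitNl rest else (pvSplitNl rest).modifyHead (c :: ·)

lemma pvSplitNl_ne_nil (cs : List Char) : pvSplitNl cs ≠ [] := by
  induction cs with
  | nil => simp [pvSplitNl]
  | cons c rest ih =>
      simp only [pvSplitNl]
      split_ifs
      · simp
      · cases h : pvSplitNl rest with
        | nil => exact absurd h ih
        | cons p ps => simp

lemma pvGoFull_spec (fuel : Nat) (l cur : List Char) (acc : List (List Char)) (h : l.length < fuel) :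
    PySem.Chars.splitOn.go ['\n'] fuel l cur acc
      = acc.reverse ++ (pvSplitNl l).modifyHead (cur.reverse ++ ·) := by
  induction fuel generalizing l cur acc with
  | zero => omega
  | succ fuel ih =>
    cases l with
    | nil => simp [PySem.Chars.splitOn.go, pvSplitNl]
    | cons c rest =>
      by_cases hc : c = '\n'
      · subst hc
        rw [show PySem.Chars.splitOn.go ['\n'] (fuel+1) ('\n' :: rest) cur acc
              = PySem.Chars.splitOn.go ['\n'] fuel (List.drop 1 ('\n' :: rest)) [] (cur.reverse :: acc) by
            simp [PySem.Chars.splitOn.go, List.isPrefixOf]]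
        rw [ih _ _ _ (by simpa using h)]
        simp only [pvSplitNl, if_pos rfl]
        cases hp : pvSplitNl rest with
        | nil => exact absurd hp (pvSplitNl_ne_nil rest)
        | cons p ps => simp [hp]
      · rw [show PySem.Chars.splitOn.go ['\n'] (fuel+1) (c :: rest) cur acc
              = PySem.Chars.splitOn.go ['\n'] fuel rest (c :: cur) acc by
            rw [PySem.Chars.splitOn.go.eq_def]
            have hpf : (['\n'].isPrefixOf (c :: rest)) = false := by
              simp only [List.isPrefixOf, Bool.and_eq_false_iff]
              left
              rw [beq_eq_false_iff_ne]
              exact fun hh => hc hh.symm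
            simp only [hpf, Bool.false_eq_true, if_false]]
        rw [ih _ _ _ (by simpa using h)]
        simp only [pvSplitNl, if_neg hc, List.modifyHead_modifyHead]
        cases hp : pvSplitNl rest with
        | nil => exact absurd hp (pvSplitNl_ne_nil rest)
        | cons p ps => simp

lemma pvSplitOn_eq (cs : List Char) : PySem.Chars.splitOn cs ['\n'] = pvSplitNl cs := by
  rw [PySem.Chars.splitOn]
  rw [pvGoFull_spec _ _ _ _ (by omega)]
  cases h : pvSplitNl cs with
  | nil => exact absurd h (pvSplitNl_ne_nil cs)
  | cons p ps => simp

lemma pvJoin_pvSplitNl (cs : List Char) : PySem.Chars.join ['\n'] (pvSplitNl cs) = cs := by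
  induction cs with
  | nil => simp [pvSplitNl, PySem.Chars.join, List.intercalate]
  | cons c rest ih =>
      by_cases hc : c = '\n'
      · subst hc
        have hsplit : pvSplitNl ('\n' :: rest) = [] :: pvSplitNl rest := by simp [pvSplitNl]
        cases hp : pvSplitNl rest with
        | nil => exact absurd hp (pvSplitNl_ne_nil rest)
        | cons p ps =>
            rw [hsplit, hp, PySem.Chars.join_cons_cons]
            rw [hp] at ih
            simp [ih]
      · have hsplit : ∀ p ps, pvSplitNl rest = p :: ps → pvSplitNl (c :: rest) = (c :: p) :: ps := by
          intro p ps hp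
          simp [pvSplitNl, hc, hp]
        cases hp : pvSplitNl rest with
        | nil => exact absurd hp (pvSplitNl_ne_nil rest)
        | cons p ps =>
            rw [hsplit p ps hp]
            cases ps with
            | nil =>
                rw [hp, PySem.Chars.join_singleton] at ih
                rw [PySem.Chars.join_singleton, ih]
            | cons q qs =>
                rw [hp, PySem.Chars.join_cons_cons] at ih
                rw [PySem.Chars.join_cons_cons]
                simp only [← ih]
                simp

-- one step of both split views at once
lemma pvLink (cs : List Char) :
    (pvSplit1 cs = [cs] ∧ pvSplitNl cs = [cs]) ∨
    ∃ a r, cs = a ++ '\n' :: r ∧ pvSplit1 cs = [a, r] ∧ pvSplitNl cs = a :: pvSplitNl r := by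
  induction cs with
  | nil => left; exact ⟨rfl, rfl⟩
  | cons c rest ih =>
      by_cases hc : c = '\n'
      · subst hc
        right
        exact ⟨[], rest, by simp, by simp [pvSplit1], by simp [pvSplitNl]⟩
      · rcases ih with ⟨h1, h2⟩ | ⟨a, r, hcs, h1, h2⟩
        · left
          constructor
          · simp [pvSplit1, hc, h1]
          · simp [pvSplitNl, hc, h2]
        · right
          refine ⟨c :: a, r, by simp [hcs], ?_, ?_⟩
          · simp [pvSplit1, hc, h1]
          · simp [pvSplitNl, hc, h2]

-- strip facts
lemma pvRstrip_append_ws (x w : List Char) (hw : w.all PySem.Chars.isspace = true) :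
    PySem.Chars.rstrip (x ++ w) = PySem.Chars.rstrip x := by
  simp only [PySem.Chars.rstrip, List.reverse_append]
  congr 1
  rw [List.dropWhile_append]
  rw [if_pos]
  simp only [List.isEmpty_iff, List.dropWhile_eq_nil_iff]
  intro a ha
  exact (List.all_eq_true.mp hw) a (by simpa using ha)

lemma pvStrip_eq_nil_iff (s : List Char) : PySem.Chars.strip s = [] ↔ s.all PySem.Chars.isspace = true := by
  simp only [PySem.Chars.strip, PySem.Chars.rstrip, PySem.Chars.lstrip]
  constructor
  · intro h
    have h2 : List.dropWhile PySem.Chars.isspace (List.dropWhile PySem.Chars.isspace s).reverse = [] := by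
      simpa using h
    rw [List.dropWhile_eq_nil_iff] at h2
    rw [List.all_eq_true]
    intro a ha
    by_cases hs : (List.dropWhile PySem.Chars.isspace s) = []
    · rw [List.dropWhile_eq_nil_iff] at hs
      exact hs a ha
    · have hsplit := List.takeWhile_append_dropWhile (p := PySem.Chars.isspace) (l := s)
      rw [← hsplit] at ha
      rcases List.mem_append.mp ha with h3 | h3
      · exact List.mem_takeWhile_imp h3
      · exact h2 a (by simpa using h3)
  · intro h
    have : List.dropWhile PySem.Chars.isspace s = [] := by
      rw [List.dropWhile_eq_nil_iff]
      exact fun a ha => (List.all_eq_true.mp h) a ha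
    simp [this]

lemma pvStrip_append_ws (x w : List Char) (hw : w.all PySem.Chars.isspace = true) :
    PySem.Chars.strip (x ++ w) = PySem.Chars.strip x := by
  by_cases hx : x.all PySem.Chars.isspace
  · have h1 : PySem.Chars.strip (x ++ w) = [] := by
      rw [pvStrip_eq_nil_iff]
      simp_all
    have h2 : PySem.Chars.strip x = [] := (pvStrip_eq_nil_iff x).mpr hx
    rw [h1, h2]
  · simp only [PySem.Chars.strip, PySem.Chars.lstrip]
    rw [List.dropWhile_append]
    rw [if_neg]
    · exact pvRstrip_append_ws _ _ hw
    · simp only [List.isEmpty_iff, List.dropWhile_eq_nil_iff]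
      intro hcon
      exact hx (List.all_eq_true.mpr hcon)

-- String/Chars bridges
lemma pvOfList_beq_empty (m : List Char) : (String.ofList m == "") = (m == ([]:List Char)) := by
  rw [show ("" : String) = String.ofList [] from rfl]
  apply Bool.eq_iff_iff.mpr
  simp [String.ofList_inj]

lemma pvStr_strip_ofList (m : List Char) : PySem.Str.strip (String.ofList m) = String.ofList (PySem.Chars.strip m) := by
  simp [PySem.Str.strip]

lemma pvStrJoin_map (L : List (List Char)) :
    PySem.Str.join "\n" (L.map String.ofList) = String.ofList (PySem.Chars.join ['\n'] L) := by
  simp [PySem.Str.join, List.map_map, Function.comp_def]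

lemma pvStripJoin_map (L : List (List Char)) :
    PySem.Str.strip (PySem.Str.join "\n" (L.map String.ofList))
      = String.ofList (PySem.Chars.strip (PySem.Chars.join ['\n'] L)) := by
  rw [pvStrJoin_map, pvStr_strip_ofList]

-- A's cut index: first blank line + 1, or the whole list
def pvIdxS (lines : List String) : Nat :=
  match lines.findIdx? (fun line => PySem.Str.strip line == "") with
  | some j => j + 1
  | none => lines.length

def pvIdx (lines : List (List Char)) : Nat :=
  match lines.findIdx? (fun l => PySem.Chars.strip l == ([] : List Char)) with
  | some j => j + 1
  | none => lines.length

lemma pvIdxS_map (lC : List (List Char)) : pvIdxS (lC.map String.ofList) = pvIdx lC := by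
  unfold pvIdxS pvIdx
  rw [List.findIdx?_map]
  have hp : ((fun line => PySem.Str.strip line == "") ∘ String.ofList)
      = (fun l => PySem.Chars.strip l == ([] : List Char)) := by
    funext l
    simp [Function.comp, pvStr_strip_ofList, pvOfList_beq_empty]
  rw [hp]
  cases h : lC.findIdx? (fun l => PySem.Chars.strip l == ([] : List Char)) <;> simp

-- once the flag is false, every remaining line is appended to long_lines
lemma pvFoldl_stepA_false (lines : List String) (s l : List String) :
    lines.foldl pvStepA (s, l, false) = (s, l ++ lines, false) := by
  induction lines generalizing l with
  | nil => simp
  | cons x xs ih =>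
      rw [List.foldl_cons]
      have hstep : pvStepA (s, l, false) x = (s, l ++ [x], false) := by
        simp only [pvStepA]
        split_ifs <;> simp_all
      rw [hstep, ih, List.append_assoc]
      rfl

-- A's loop from its initial state computes the take/drop split at the first blank line
lemma pvFoldl_stepA_true (lines : List String) (s : List String) :
    lines.foldl pvStepA (s, [], true)
      = (s ++ lines.take (pvIdxS lines), lines.drop (pvIdxS lines),
         (lines.findIdx? (fun line => PySem.Str.strip line == "")).isNone) := by
  induction lines generalizing s with
  | nil => simp [pvIdxS]
  | cons x xs ih =>
      rw [List.foldl_cons]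
      by_cases hx : (PySem.Str.strip x == "") = true
      · have hstep : pvStepA (s, [], true) x = (s ++ [x], [], false) := by
          simp [pvStepA, hx]
        rw [hstep, pvFoldl_stepA_false]
        simp [pvIdxS, List.findIdx?_cons, hx]
      · have hstep : pvStepA (s, [], true) x = (s ++ [x], [], true) := by
          simp [pvStepA, hx]
        rw [hstep, ih]
        cases hf : xs.findIdx? (fun line => PySem.Str.strip line == "") with
        | some j => simp [pvIdxS, List.findIdx?_cons, hx, hf]
        | none => simp [pvIdxS, List.findIdx?_cons, hx, hf, List.take_of_length_le, List.drop_of_length_le]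

lemma pvIdx_pos (lines : List (List Char)) (h : lines ≠ []) : pvIdx lines ≠ 0 := by
  unfold pvIdx
  cases hf : lines.findIdx? (fun l => PySem.Chars.strip l == ([] : List Char)) with
  | some j => simp
  | none =>
      simp only []
      intro hl
      exact h (List.length_eq_zero_iff.mp hl)

-- the main invariant: A's joined take/drop halves are B's halves up to a whitespace tail on short
lemma pvMainAux : ∀ (n : Nat) (cs : List Char), cs.length ≤ n →
    ∃ w : List Char, w.all PySem.Chars.isspace = true ∧
      PySem.Chars.join ['\n'] ((pvSplitNl cs).take (pvIdx (pvSplitNl cs))) = (pvCut cs).1 ++ w ∧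
      PySem.Chars.join ['\n'] ((pvSplitNl cs).drop (pvIdx (pvSplitNl cs))) = (pvCut cs).2 := by
  intro n
  induction n using Nat.strong_induction_on with
  | _ n ih =>
      intro cs hcs
      rcases pvLink cs with ⟨h1, h2⟩ | ⟨a, r, hcs_eq, h1, h2⟩
      · -- no newline in cs: one line
        have hsX : PySem.Chars.splitOnMax cs ['\n'] 1 = [cs] := by
          rw [pvSplitOnMax_one]; exact h1
        have hcut : pvCut cs = (cs, []) := by
          rw [pvCut.eq_def]
          split
          · rfl
          · next first rest heq =>
              rw [hsX] at heq
              simp at heq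
          · rfl
        have hidx : pvIdx [cs] = 1 := by
          unfold pvIdx
          rw [List.findIdx?_cons]
          cases hb : (PySem.Chars.strip cs == ([] : List Char)) <;> simp [hb]
        refine ⟨[], rfl, ?_, ?_⟩
        · rw [h2, hidx, hcut]
          simp [PySem.Chars.join_singleton]
        · rw [h2, hidx, hcut]
          simp [PySem.Chars.join, List.intercalate]
      · -- cs = a ++ '\n' :: r
        have hsX : PySem.Chars.splitOnMax cs ['\n'] 1 = [a, r] := by
          rw [pvSplitOnMax_one]; exact h1
        by_cases hb : PySem.Chars.strip a = []
        · -- first line blank: cut here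
          have hcut : pvCut cs = ([], r) := by
            rw [pvCut.eq_def]
            split
            · next x heq =>
                rw [hsX] at heq
                simp at heq
            · next first rest heq =>
                rw [hsX] at heq
                obtain ⟨rfl, rfl⟩ := by simpa using heq
                rw [if_pos hb]
            · next hne1 hne2 =>
                exact absurd hsX (hne2 a r)
          have hba : (PySem.Chars.strip a == ([] : List Char)) = true := by simp [hb]
          have hidx : pvIdx (a :: pvSplitNl r) = 1 := by
            unfold pvIdx
            rw [List.findIdx?_cons]
            simp [hba]
          refine ⟨a, (pvStrip_eq_nil_iff a).mp hb, ?_, ?_⟩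
          · rw [h2, hidx, hcut]
            simp [PySem.Chars.join_singleton]
          · rw [h2, hidx, hcut]
            simpa using pvJoin_pvSplitNl r
        · -- first line not blank: recurse on r
          have hlen : r.length < n := by
            have : cs.length = a.length + r.length + 1 := by simp [hcs_eq]; omega
            omega
          obtain ⟨w, hw, hA, hB⟩ := ih r.length hlen r le_rfl
          have hcut : pvCut cs = (a ++ '\n' :: (pvCut r).1, (pvCut r).2) := by
            rw [pvCut.eq_def]
            split
            · next x heq =>
                rw [hsX] at heq
                simp at heq
            · next first rest heq =>
                rw [hsX] at heq
                obtain ⟨rfl, rfl⟩ := by simpa using heq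
                rw [if_neg hb]
            · next hne1 hne2 =>
                exact absurd hsX (hne2 a r)
          have hba : (PySem.Chars.strip a == ([] : List Char)) = false := by simp [hb]
          have hidx : pvIdx (a :: pvSplitNl r) = pvIdx (pvSplitNl r) + 1 := by
            unfold pvIdx
            rw [List.findIdx?_cons]
            simp only [hba, Bool.false_eq_true, if_false]
            cases hf : (pvSplitNl r).findIdx? (fun l => PySem.Chars.strip l == ([] : List Char)) <;> simp
          have htake : (pvSplitNl r).take (pvIdx (pvSplitNl r)) ≠ [] := by
            have hpos := pvIdx_pos _ (pvSplitNl_ne_nil r)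
            simp [List.take_eq_nil_iff, hpos, pvSplitNl_ne_nil r]
          cases ht : (pvSplitNl r).take (pvIdx (pvSplitNl r)) with
          | nil => exact absurd ht htake
          | cons t ts =>
              refine ⟨w, hw, ?_, ?_⟩
              · rw [h2, hidx, List.take_succ_cons, ht, PySem.Chars.join_cons_cons, ← ht, hA, hcut]
                simp
              · rw [h2, hidx, List.drop_succ_cons, hB, hcut]

lemma pvMain (cs : List Char) :
    ∃ w : List Char, w.all PySem.Chars.isspace = true ∧
      PySem.Chars.join ['\n'] ((pvSplitNl cs).take (pvIdx (pvSplitNl cs))) = (pvCut cs).1 ++ w ∧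
      PySem.Chars.join ['\n'] ((pvSplitNl cs).drop (pvIdx (pvSplitNl cs))) = (pvCut cs).2 :=
  pvMainAux cs.length cs le_rfl

-- ===== VERDICT (by name: the statement is the Claim_ definition above) =====
set_option maxHeartbeats 1000000 in
theorem parse_descriptions_spec : Claim_equal_parse_descriptions := by
  intro description _
  unfold Spec_parse_descriptions parse_descriptions parse_descriptions_alt
  dsimp only
  have hlines : (PySem.Str.split? (PySem.Str.strip description) "\n").getD []
      = (pvSplitNl (PySem.Str.strip description).toList).map String.ofList := by
    rw [PySem.Str.split?]
    rw [show ("\n" : String).toList = ['\n'] from rfl]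
    rw [show PySem.Chars.split? (PySem.Str.strip description).toList ['\n']
          = some (PySem.Chars.splitOn (PySem.Str.strip description).toList ['\n']) from by
        simp [PySem.Chars.split?]]
    rw [pvSplitOn_eq]
    rfl
  rw [hlines]
  rw [pvFoldl_stepA_true]
  dsimp only
  rw [pvIdxS_map]
  rw [← List.map_take, ← List.map_drop]
  rw [List.nil_append]
  rw [pvStripJoin_map, pvStripJoin_map]
  obtain ⟨w, hw, hA, hB⟩ := pvMain (PySem.Str.strip description).toList
  rw [hA, hB, pvStrip_append_ws _ _ hw]
  rw [pvOfList_beq_empty, pvOfList_beq_empty]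
  by_cases hs : PySem.Chars.strip (pvCut (PySem.Str.strip description).toList).1 = [] <;>
    by_cases hl : PySem.Chars.strip (pvCut (PySem.Str.strip description).toList).2 = [] <;>
      simp [hs, hl]
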